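-- pv_equiv track=rewrite | github.com/kritishmohapatra/GFG_SOLUTIONS | Difficulty: Easy/Shop in Candy Store/shop-in-candy-store.py | minMaxCandy
-- ===== SOURCE A (Python) =====
-- def minMaxCandy(prices, k):
--     # code here
--     prices.sort()
--     n=len(prices)
--     mini=0
--     i, end=0, n-1
--     while i<=end:
--         mini+=prices[i]
--         i+=1
--
--         end-=k
--     maxi=0
--     i, start=n-1, 0
--     while i>=start:
--         maxi+=prices[i]
--         i-=1
--
--         start+=k
--     return [mini, maxi]
-- ===== SOURCE B (Python) =====
-- def minMaxCandy(prices, k):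
--     prices.sort()  # same in-place sort side effect as A
--     n = len(prices)
--     m = (n + k) // (k + 1)  # number of candies actually paid for
--     return [sum(prices[:m]), sum(prices[n - m:])]
-- ===== Notes on version B (the rewrite author's own statement) =====
-- stated objective: simpler
-- what changed: Replaces the two converging-pointer while-loops with the closed-form count m = (n + k) // (k + 1) of paid candies and two slice sums (m cheapest, m most expensive).
-- outside the precondition, e.g. on minMaxCandy([], -1): A returns [0, 0], B raises ZeroDivisionError
import Mathlib
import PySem

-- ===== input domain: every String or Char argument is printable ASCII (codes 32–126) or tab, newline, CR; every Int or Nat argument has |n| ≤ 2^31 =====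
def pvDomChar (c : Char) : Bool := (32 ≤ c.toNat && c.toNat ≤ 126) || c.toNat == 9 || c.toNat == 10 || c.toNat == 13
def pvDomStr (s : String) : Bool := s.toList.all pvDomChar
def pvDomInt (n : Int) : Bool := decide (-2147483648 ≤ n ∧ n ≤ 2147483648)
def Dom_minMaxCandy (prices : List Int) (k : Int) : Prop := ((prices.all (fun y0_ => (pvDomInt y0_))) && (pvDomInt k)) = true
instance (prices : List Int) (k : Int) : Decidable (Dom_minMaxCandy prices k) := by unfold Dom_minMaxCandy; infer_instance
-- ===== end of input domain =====

-- B replaces A's two converging-pointer loops by the closed-form paid-candy count m = (n+k)//(k+1)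
-- and two slice sums (objective: simpler). Both A and B sort `prices` in place; the equivalence
-- proved here is about the RETURN value.

-- ===== PORT A =====
-- first while loop: mini += prices[i]; i += 1; end -= k   (fuel-bounded; fuel n+1 suffices for k ≥ 0)
def pvLoopMin (l : List Int) (k : Int) : Nat → Int → Int → Int → Int
  | 0, _, _, acc => acc
  | f+1, i, e, acc =>
    if i ≤ e then
      match PySem.List.pyGet? l i with
      | some v => pvLoopMin l k f (i+1) (e-k) (acc+v)
      | none => acc   -- IndexError (unreachable under Pre_)
    else acc

-- second while loop: maxi += prices[i]; i -= 1; start += k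
def pvLoopMax (l : List Int) (k : Int) : Nat → Int → Int → Int → Int
  | 0, _, _, acc => acc
  | f+1, i, s, acc =>
    if i ≥ s then
      match PySem.List.pyGet? l i with
      | some v => pvLoopMax l k f (i-1) (s+k) (acc+v)
      | none => acc   -- IndexError (unreachable under Pre_)
    else acc

def minMaxCandy (prices : List Int) (k : Int) : List Int :=
  let l := PySem.List.sorted prices (fun x => x) false
  let n : Int := l.length
  [pvLoopMin l k (l.length + 1) 0 (n-1) 0, pvLoopMax l k (l.length + 1) (n-1) 0 0]

-- ===== PORT B =====
def minMaxCandy_alt (prices : List Int) (k : Int) : List Int :=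
  let l := PySem.List.sorted prices (fun x => x) false
  let n : Int := l.length
  let m := PySem.Int.floordiv (n + k) (k + 1)
  [(PySem.List.slice l none (some m)).sum, (PySem.List.slice l (some (n - m)) none).sum]

-- ===== PRECONDITION & SPEC =====
-- Pre_ excludes negative k: there A's loops run past the list into an IndexError whenever the
-- list is nonempty (and on the empty list A's [0,0] is reached only because the loops never
-- start, while B's formula divides by k+1, which is 0 at k = -1).
def Pre_minMaxCandy (prices : List Int) (k : Int) : Prop := 0 ≤ k
instance (prices : List Int) (k : Int) : Decidable (Pre_minMaxCandy prices k) := by unfold Pre_minMaxCandy; infer_instance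
def pvWitness_minMaxCandy : List Int × Int := ([3, 1, 4, 2], 1)

def Spec_minMaxCandy (prices : List Int) (k : Int) (out : List Int) : Prop := out = minMaxCandy_alt prices k
instance (prices : List Int) (k : Int) (out : List Int) : Decidable (Spec_minMaxCandy prices k out) := by unfold Spec_minMaxCandy; infer_instance

-- ===== CLAIM (what is proved, stated in full; the proofs are below) =====
def Claim_equal_minMaxCandy : Prop := ∀ (prices : List Int) (k : Int), Dom_minMaxCandy prices k → Pre_minMaxCandy prices k → Spec_minMaxCandy prices k (minMaxCandy prices k)

-- ===== LEMMAS AND PROOFS =====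

-- number of iterations of A's min loop started at (i, e)
def pvIters (k i e : Int) : Nat := if i ≤ e then ((e - i) / (k+1)).toNat + 1 else 0

theorem pvIters_step (k i e : Int) (hk : 0 ≤ k) (h : i ≤ e) :
    pvIters k i e = pvIters k (i+1) (e-k) + 1 := by
  unfold pvIters
  by_cases h2 : i + 1 ≤ e - k
  · have hne : (k+1) ≠ 0 := by omega
    have : e - i = (e - k - (i+1)) + 1 * (k+1) := by ring
    rw [if_pos h, if_pos h2, this, Int.add_mul_ediv_right _ _ hne]
    have h0 : 0 ≤ (e - k - (i+1)) / (k+1) := Int.ediv_nonneg (by omega) (by omega)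
    omega
  · have : (e - i) / (k+1) = 0 := Int.ediv_eq_zero_of_lt (by omega) (by omega)
    rw [if_pos h, if_neg h2, this]
    simp

theorem pvLoopMin_eq (l : List Int) (k : Int) (hk : 0 ≤ k) :
    ∀ (f : Nat) (i e acc : Int), 0 ≤ i → e ≤ (l.length : Int) - 1 →
      pvIters k i e ≤ f →
      pvLoopMin l k f i e acc = acc + ((l.drop i.toNat).take (pvIters k i e)).sum := by
  intro f
  induction f with
  | zero =>
    intro i e acc hi he hf
    have : pvIters k i e = 0 := by omega
    simp [pvLoopMin, this]
  | succ f ih =>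
    intro i e acc hi he hf
    by_cases h : i ≤ e
    · have hlt : i < (l.length : Int) := by omega
      have hnat : i.toNat < l.length := by omega
      have hget : PySem.List.pyGet? l i = some (l[i.toNat]'hnat) :=
        PySem.List.pyGet?_eq_some_getElem l hi hlt
      have hstep := pvIters_step k i e hk h
      have hrec := ih (i+1) (e-k) (acc + l[i.toNat]'hnat) (by omega) (by omega) (by omega)
      have hdrop : l.drop i.toNat = (l[i.toNat]'hnat) :: l.drop (i.toNat + 1) :=
        List.drop_eq_getElem_cons hnat
      have htn : (i+1).toNat = i.toNat + 1 := by omega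
      simp only [pvLoopMin, if_pos h, hget]
      rw [hrec, hstep, hdrop, htn, List.take_succ_cons, List.sum_cons]
      ring
    · have h0 : pvIters k i e = 0 := by simp [pvIters, h]
      simp [pvLoopMin, h, h0]

theorem pvLoopMax_eq_rev (l : List Int) (k : Int) (hk : 0 ≤ k) :
    ∀ (f : Nat) (i s acc : Int), 0 ≤ s → i ≤ (l.length : Int) - 1 →
      pvLoopMax l k f i s acc =
        pvLoopMin l.reverse k f ((l.length : Int) - 1 - i) ((l.length : Int) - 1 - s) acc := by
  intro f
  induction f with
  | zero => intro i s acc _ _; simp [pvLoopMax, pvLoopMin]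
  | succ f ih =>
    intro i s acc hs hi
    by_cases h : i ≥ s
    · have hi0 : 0 ≤ i := by omega
      have hlt : i < (l.length : Int) := by omega
      have hnat : i.toNat < l.length := by omega
      have hrnat : ((l.length : Int) - 1 - i).toNat < l.reverse.length := by simp; omega
      have hget : PySem.List.pyGet? l i = some (l[i.toNat]'hnat) :=
        PySem.List.pyGet?_eq_some_getElem l hi0 hlt
      have hgetr : PySem.List.pyGet? l.reverse ((l.length : Int) - 1 - i)
          = some (l.reverse[((l.length : Int) - 1 - i).toNat]'hrnat) :=
        PySem.List.pyGet?_eq_some_getElem l.reverse (by omega) (by simp; omega)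
      have hrev : l.reverse[((l.length : Int) - 1 - i).toNat]'hrnat = l[i.toNat]'hnat := by
        rw [List.getElem_reverse]
        congr 1
        omega
      have hcond : ((l.length : Int) - 1 - i) ≤ ((l.length : Int) - 1 - s) := by omega
      simp only [pvLoopMax, pvLoopMin, if_pos h, if_pos hcond, hget, hgetr, hrev]
      rw [show (l.length : Int) - 1 - i + 1 = (l.length : Int) - 1 - (i-1) from by ring,
          show (l.length : Int) - 1 - s - k = (l.length : Int) - 1 - (s+k) from by ring]
      exact ih (i-1) (s+k) _ (by omega) (by omega)
    · have hcond : ¬ ((l.length : Int) - 1 - i) ≤ ((l.length : Int) - 1 - s) := by omega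
      simp [pvLoopMax, pvLoopMin, h, hcond]

theorem pv_main (l : List Int) (k : Int) (hk : 0 ≤ k) :
    [pvLoopMin l k (l.length + 1) 0 ((l.length : Int) - 1) 0,
     pvLoopMax l k (l.length + 1) ((l.length : Int) - 1) 0 0]
    = [(PySem.List.slice l none (some (PySem.Int.floordiv ((l.length : Int) + k) (k + 1)))).sum,
       (PySem.List.slice l (some ((l.length : Int) - PySem.Int.floordiv ((l.length : Int) + k) (k + 1))) none).sum] := by
  have hk1 : (k+1) ≠ 0 := by omega
  have hn0 : (0:Int) ≤ (l.length : Int) := by positivity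
  have hm : PySem.Int.floordiv ((l.length : Int) + k) (k + 1) = ((pvIters k 0 ((l.length : Int) - 1) : Nat) : Int) := by
    rw [PySem.Int.floordiv_eq_ediv_of_pos (by omega)]
    unfold pvIters
    by_cases h1 : (0:Int) ≤ (l.length : Int) - 1
    · rw [if_pos h1,
         show ((l.length : Int) + k) = ((l.length : Int) - 1 - 0) + 1 * (k+1) from by ring,
         Int.add_mul_ediv_right _ _ hk1]
      have h0 : 0 ≤ ((l.length : Int) - 1 - 0) / (k+1) := Int.ediv_nonneg (by omega) (by omega)
      push_cast
      omega
    · rw [if_neg h1, show ((l.length : Int) + k) = k from by omega]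
      simpa using Int.ediv_eq_zero_of_lt hk (by omega)
  have htle : ((pvIters k 0 ((l.length : Int) - 1) : Nat) : Int) ≤ (l.length : Int) := by
    unfold pvIters
    by_cases h1 : (0:Int) ≤ (l.length : Int) - 1
    · rw [if_pos h1]
      have h2 : ((l.length : Int) - 1 - 0) / (k+1) ≤ (l.length : Int) - 1 - 0 :=
        Int.ediv_le_self _ (by omega)
      have h0 : 0 ≤ ((l.length : Int) - 1 - 0) / (k+1) := Int.ediv_nonneg (by omega) (by omega)
      push_cast
      omega
    · rw [if_neg h1]
      simp
  have hfuel : pvIters k 0 ((l.length : Int) - 1) ≤ l.length + 1 := by omega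
  -- min component
  have A1 : pvLoopMin l k (l.length + 1) 0 ((l.length : Int) - 1) 0
      = (l.take (pvIters k 0 ((l.length : Int) - 1))).sum := by
    rw [pvLoopMin_eq l k hk (l.length + 1) 0 ((l.length : Int) - 1) 0 le_rfl (by omega) hfuel]
    simp
  -- max component
  have A2 : pvLoopMax l k (l.length + 1) ((l.length : Int) - 1) 0 0
      = (l.drop (l.length - pvIters k 0 ((l.length : Int) - 1))).sum := by
    rw [pvLoopMax_eq_rev l k hk (l.length + 1) ((l.length : Int) - 1) 0 0 le_rfl (by omega),
        show (l.length : Int) - 1 - ((l.length : Int) - 1) = 0 from by ring, sub_zero]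
    have hlen : ((l.reverse.length : Int)) = (l.length : Int) := by simp
    have hfuel' : pvIters k 0 ((l.reverse.length : Int) - 1) ≤ l.length + 1 := by
      rw [hlen]; exact hfuel
    rw [pvLoopMin_eq l.reverse k hk (l.length + 1) 0 ((l.length : Int) - 1) 0 le_rfl (by rw [hlen]) (by rw [hlen] at hfuel'; exact hfuel')]
    simp only [Int.toNat_zero, List.drop_zero, zero_add]
    rw [List.take_reverse, List.sum_reverse]
  -- B's slices
  have B1 : PySem.List.slice l none (some (PySem.Int.floordiv ((l.length : Int) + k) (k + 1)))
      = l.take (pvIters k 0 ((l.length : Int) - 1)) := by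
    rw [hm]
    exact PySem.List.slice_to_natCast l _
  have B2 : PySem.List.slice l (some ((l.length : Int) - PySem.Int.floordiv ((l.length : Int) + k) (k + 1))) none
      = l.drop (l.length - pvIters k 0 ((l.length : Int) - 1)) := by
    rw [hm,
        show (l.length : Int) - ((pvIters k 0 ((l.length : Int) - 1) : Nat) : Int)
          = ((l.length - pvIters k 0 ((l.length : Int) - 1) : Nat) : Int) from by omega]
    exact PySem.List.slice_from_natCast l _
  rw [A1, A2, B1, B2]

-- ===== VERDICT (by name: the statement is the Claim_ definition above) =====
theorem minMaxCandy_spec : Claim_equal_minMaxCandy := by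
  intro prices k _hdom hk
  have hk' : (0:Int) ≤ k := hk
  unfold Spec_minMaxCandy minMaxCandy minMaxCandy_alt
  exact pv_main (PySem.List.sorted prices (fun x => x) false) k hk'
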